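-- pv_equiv track=rewrite | github.com/cristinadece/TwitterCrisis | util/ngrams.py | window_no_hashtags
-- ===== SOURCE A (Python) =====
-- from itertools import islice
--
-- def contains_hashtag(iterable):
--     for elem in iterable:
--         if elem.startswith('#'):
--             return True
--     return False
--
-- def window_no_hashtags(seq, n=2):
--     it = iter(seq)
--     result = tuple(islice(it, n))
--     if (len(result) == n) and ( not contains_hashtag(result)):
--         yield u' '.join(result)
--     for elem in it:
--         result = result[1:] + (elem,)
--         if not contains_hashtag(result):
--             yield u' '.join(result)
-- ===== SOURCE B (Python) =====
-- def window_no_hashtags(seq, n=2):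
--     # One pass with an incremental hashtag count: no per-window rescan.
--     out = []
--     window = []
--     bad = 0
--     for tok in seq:
--         window.append(tok)
--         if tok.startswith('#'):
--             bad += 1
--         if len(window) > n:
--             if window.pop(0).startswith('#'):
--                 bad -= 1
--         if len(window) == n and bad == 0:
--             out.append(' '.join(window))
--     return out
-- ===== Notes on version B (the rewrite author's own statement) =====
-- stated objective: faster
-- what changed: B makes a single pass keeping a running count of hashtag tokens in the current window (updated as the window slides), so each window is tested in O(1) instead of A's per-window rescan by contains_hashtag.
-- outside the precondition, e.g. on window_no_hashtags(['a'], 0): A returns ['', 'a'], B returns ['']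
import Mathlib
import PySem

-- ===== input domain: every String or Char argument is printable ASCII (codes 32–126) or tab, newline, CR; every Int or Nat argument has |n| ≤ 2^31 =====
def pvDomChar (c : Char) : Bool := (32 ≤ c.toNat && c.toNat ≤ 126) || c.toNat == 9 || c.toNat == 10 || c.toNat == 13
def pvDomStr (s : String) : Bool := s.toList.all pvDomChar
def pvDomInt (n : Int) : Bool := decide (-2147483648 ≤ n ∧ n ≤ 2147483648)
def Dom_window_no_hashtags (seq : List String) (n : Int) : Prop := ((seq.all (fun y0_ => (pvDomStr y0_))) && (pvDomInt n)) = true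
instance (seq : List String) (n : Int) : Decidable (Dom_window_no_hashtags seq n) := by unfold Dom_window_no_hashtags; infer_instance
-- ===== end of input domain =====

-- B replaces A's per-window hashtag rescan by a single pass with an incremental
-- hashtag count, testing each window in O(1).


-- ===== PORT A =====
-- for elem in iterable: if elem.startswith('#'): return True / return False
def pyContainsHashtag : List String → Bool
  | [] => false
  | elem :: rest =>
    if PySem.Str.startswith elem "#" then true else pyContainsHashtag rest

-- the generator's trailing loop: for elem in it: result = result[1:] + (elem,); if not contains_hashtag(result): yield ...
def pyWindowLoop (result : List String) : List String → List String
  | [] => []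
  | elem :: it =>
    let result' := PySem.List.slice result (some 1) none ++ [elem]
    (if pyContainsHashtag result' = false then [PySem.Str.join " " result'] else [])
      ++ pyWindowLoop result' it

-- the yielded values of the generator, in order; tuple(islice(it, n)) = seq.take n.toNat
-- (for n < 0 islice raises ValueError in Python: those inputs are outside Pre_)
def window_no_hashtags (seq : List String) (n : Int) : List String :=
  let result := seq.take n.toNat
  let it := seq.drop n.toNat
  (if ((result.length : Int) = n ∧ pyContainsHashtag result = false)
     then [PySem.Str.join " " result] else [])
    ++ pyWindowLoop result it

-- ===== PORT B =====
-- one pass: window grows by tok, pops its head once longer than n, bad counts '#'-tokens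
def altLoop (n : Int) (window : List String) (bad : Int) (acc : List String) :
    List String → List String
  | [] => acc
  | tok :: rest =>
    let window1 := window ++ [tok]
    let bad1 := if PySem.Str.startswith tok "#" then bad + 1 else bad
    let st :=
      if ((window1.length : Int) > n) then
        match window1 with
        | [] => (window1, bad1)   -- unreachable: window1 ends in tok
        | h :: t => (t, if PySem.Str.startswith h "#" then bad1 - 1 else bad1)
      else (window1, bad1)
    let acc1 :=
      if (((st.1.length : Int) = n) ∧ st.2 = 0)
        then acc ++ [PySem.Str.join " " st.1] else acc
    altLoop n st.1 st.2 acc1 rest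

def window_no_hashtags_alt (seq : List String) (n : Int) : List String :=
  altLoop n [] 0 [] seq

-- ===== PRECONDITION & SPEC =====
-- Pre_ excludes n ≤ 0: for n < 0 A raises ValueError (islice rejects a negative stop),
-- and at n = 0 both A's value (an empty joined window followed by size-1 windows, an
-- accident of tuple slicing) and B's are degenerate values no windowing spec would pin down.
def Pre_window_no_hashtags (seq : List String) (n : Int) : Prop := 1 ≤ n
instance (seq : List String) (n : Int) : Decidable (Pre_window_no_hashtags seq n) := by
  unfold Pre_window_no_hashtags; infer_instance
def pvWitness_window_no_hashtags : List String × Int := (["a", "#x", "b", "c"], 2)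

def Spec_window_no_hashtags (seq : List String) (n : Int) (out : List String) : Prop :=
  out = window_no_hashtags_alt seq n
instance (seq : List String) (n : Int) (out : List String) :
    Decidable (Spec_window_no_hashtags seq n out) := by
  unfold Spec_window_no_hashtags; infer_instance

-- ===== CLAIM (what is proved, stated in full; the proofs are below) =====
def Claim_equal_window_no_hashtags : Prop := ∀ (seq : List String) (n : Int), Dom_window_no_hashtags seq n → Pre_window_no_hashtags seq n → Spec_window_no_hashtags seq n (window_no_hashtags seq n)

-- ===== LEMMAS AND PROOFS =====

-- the number of hashtag tokens in a window
def countHash (w : List String) : Int :=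
  ((w.countP (fun s => PySem.Str.startswith s "#")) : Int)

theorem countHash_nil : countHash [] = 0 := rfl

theorem countHash_cons (h : String) (t : List String) :
    countHash (h :: t) =
      (if PySem.Str.startswith h "#" then (1:Int) else 0) + countHash t := by
  unfold countHash
  rw [List.countP_cons]
  split_ifs <;> push_cast <;> omega

theorem countHash_append (a b : List String) :
    countHash (a ++ b) = countHash a + countHash b := by
  simp [countHash, List.countP_append]

theorem countHash_nonneg (w : List String) : 0 ≤ countHash w := by
  simp [countHash]

theorem contains_eq_false_iff (w : List String) :
    pyContainsHashtag w = false ↔ countHash w = 0 := by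
  induction w with
  | nil => simp [pyContainsHashtag, countHash_nil]
  | cons h t ih =>
    have hnn := countHash_nonneg t
    rw [countHash_cons]
    simp only [pyContainsHashtag]
    by_cases hs : PySem.Str.startswith h "#" = true
    · rw [if_pos hs, if_pos hs]
      constructor
      · intro hf; exact absurd hf (by simp)
      · intro he; exfalso; omega
    · rw [if_neg hs, if_neg hs, ih]
      constructor
      · intro he; omega
      · intro he; omega

-- steady state: once the window has exactly m = n tokens (m ≥ 1) and bad counts its
-- hashtags, B's loop emits exactly what A's trailing loop yields
theorem altLoop_steady (m : Nat) (hm : 1 ≤ m) (rest : List String) :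
    ∀ (w : List String) (acc : List String), w.length = m →
      altLoop (m : Int) w (countHash w) acc rest = acc ++ pyWindowLoop w rest := by
  induction rest with
  | nil => intro w acc _; simp [altLoop, pyWindowLoop]
  | cons tok rest ih =>
    intro w acc hw
    obtain ⟨h, t, rfl⟩ : ∃ h t, w = h :: t := by
      cases w with
      | nil => simp at hw; omega
      | cons h t => exact ⟨h, t, rfl⟩
    have hw' : t.length + 1 = m := by simpa using hw
    rw [altLoop]
    simp only [List.cons_append]
    have hgt : ((h :: (t ++ [tok])).length : Int) > (m : Int) := by
      simp only [List.length_cons, List.length_append]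
      push_cast; omega
    simp only [if_pos hgt]
    have hbad : (if PySem.Str.startswith h "#" then
          (if PySem.Str.startswith tok "#" then countHash (h :: t) + 1 else countHash (h :: t)) - 1
        else (if PySem.Str.startswith tok "#" then countHash (h :: t) + 1 else countHash (h :: t)))
        = countHash (t ++ [tok]) := by
      rw [countHash_cons, countHash_append, countHash_cons, countHash_nil]
      split_ifs <;> omega
    rw [hbad]
    have hw2 : (t ++ [tok]).length = m := by simp; omega
    have hlen : (((t ++ [tok]).length : Int) = (m : Int)) := by rw [hw2]
    rw [pyWindowLoop, PySem.List.slice_from_one]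
    simp only [List.tail_cons]
    by_cases hz : countHash (t ++ [tok]) = 0
    · rw [if_pos ⟨hlen, hz⟩, ih (t ++ [tok]) _ hw2,
          if_pos ((contains_eq_false_iff _).mpr hz)]
      simp
    · have hc : ¬ pyContainsHashtag (t ++ [tok]) = false := by
        rw [contains_eq_false_iff]; exact hz
      rw [if_neg (by intro hp; exact hz hp.2), ih (t ++ [tok]) _ hw2, if_neg hc]
      simp

-- filling phase: while the window is still shorter than m it only grows; once it
-- reaches length m the first (possible) emission happens and the steady state starts
theorem altLoop_fill (m : Nat) (hm : 1 ≤ m) (rest : List String) :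
    ∀ (w : List String) (acc : List String), w.length < m →
      altLoop (m : Int) w (countHash w) acc rest =
        if w.length + rest.length < m then acc
        else
          acc ++
            ((if pyContainsHashtag (w ++ rest.take (m - w.length)) = false
                then [PySem.Str.join " " (w ++ rest.take (m - w.length))] else [])
              ++ pyWindowLoop (w ++ rest.take (m - w.length)) (rest.drop (m - w.length))) := by
  induction rest with
  | nil =>
    intro w acc hw
    rw [if_pos (by simpa using hw)]
    simp [altLoop]
  | cons tok rest ih =>
    intro w acc hw
    have hlen1 : (w ++ [tok]).length = w.length + 1 := by simp
    have hle : ¬ (((w ++ [tok]).length : Int) > (m : Int)) := by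
      rw [hlen1]; push_cast; omega
    rw [altLoop]
    simp only [if_neg hle]
    have hbad1 : (if PySem.Str.startswith tok "#" then countHash w + 1 else countHash w)
        = countHash (w ++ [tok]) := by
      rw [countHash_append, countHash_cons, countHash_nil]; split_ifs <;> omega
    rw [hbad1]
    by_cases hfull : w.length + 1 = m
    · -- the window becomes full now
      have hwlen : (w ++ [tok]).length = m := by rw [hlen1, hfull]
      have hlen : (((w ++ [tok]).length : Int) = (m : Int)) := by rw [hwlen]
      have hmw : m - w.length = 1 := by omega
      have htake : List.take (m - w.length) (tok :: rest) = [tok] := by rw [hmw]; simp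
      have hdrop : List.drop (m - w.length) (tok :: rest) = rest := by rw [hmw]; simp
      have houter : ¬ (w.length + (tok :: rest).length < m) := by simp; omega
      rw [if_neg houter, htake, hdrop]
      by_cases hz : countHash (w ++ [tok]) = 0
      · rw [if_pos ⟨hlen, hz⟩, altLoop_steady m hm rest (w ++ [tok]) _ hwlen,
            if_pos ((contains_eq_false_iff _).mpr hz)]
        simp
      · have hc : ¬ pyContainsHashtag (w ++ [tok]) = false := by
          rw [contains_eq_false_iff]; exact hz
        rw [if_neg (fun hp => hz hp.2), altLoop_steady m hm rest (w ++ [tok]) _ hwlen,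
            if_neg hc]
        simp
    · -- the window is still short
      have hlt : (w ++ [tok]).length < m := by rw [hlen1]; omega
      have hne : ¬ ((((w ++ [tok]).length : Int) = (m : Int)) ∧ countHash (w ++ [tok]) = 0) := by
        intro hp
        have h1 := hp.1
        rw [hlen1] at h1
        push_cast at h1
        omega
      rw [if_neg hne, ih (w ++ [tok]) acc hlt]
      have h1 : m - w.length = (m - (w ++ [tok]).length) + 1 := by rw [hlen1]; omega
      have htake : (w ++ [tok]) ++ List.take (m - (w ++ [tok]).length) rest
          = w ++ List.take (m - w.length) (tok :: rest) := by
        rw [h1]; simp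
      have hdrop : List.drop (m - (w ++ [tok]).length) rest
          = List.drop (m - w.length) (tok :: rest) := by
        rw [h1]; simp
      have hcond : ((w ++ [tok]).length + rest.length < m) ↔ (w.length + (tok :: rest).length < m) := by
        rw [hlen1]; simp only [List.length_cons]; omega
      rw [htake, hdrop, if_congr hcond rfl rfl]

-- ===== VERDICT (by name: the statement is the Claim_ definition above) =====
theorem window_no_hashtags_spec : Claim_equal_window_no_hashtags := by
  intro seq n _ hpre
  have hpre' : 1 ≤ n := hpre
  have hn : ((n.toNat : Int)) = n := Int.toNat_of_nonneg (by omega)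
  set m := n.toNat with hm
  have hm1 : 1 ≤ m := by omega
  unfold Spec_window_no_hashtags window_no_hashtags window_no_hashtags_alt
  dsimp only
  rw [← hn]
  rw [show (0 : Int) = countHash [] from rfl,
      altLoop_fill m hm1 seq [] [] (by simpa using hm1)]
  simp only [Int.toNat_natCast, List.length_nil, List.nil_append, Nat.zero_add, Nat.sub_zero]
  by_cases hshort : seq.length < m
  · rw [if_pos hshort]
    have hc : ¬ ((((List.take m seq).length : Int) = (m : Int)) ∧
        pyContainsHashtag (List.take m seq) = false) := by
      intro hp
      have h1 := hp.1
      rw [List.length_take] at h1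
      omega
    rw [if_neg hc, List.drop_eq_nil_of_le (le_of_lt hshort)]
    simp [pyWindowLoop]
  · rw [if_neg hshort]
    have htl : (List.take m seq).length = m := by
      rw [List.length_take]; omega
    have hlen : (((List.take m seq).length : Int) = (m : Int)) := by rw [htl]
    by_cases hc : pyContainsHashtag (List.take m seq) = false
    · rw [if_pos ⟨hlen, hc⟩, if_pos hc]
    · rw [if_neg (fun hp => hc hp.2), if_neg hc]
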